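-- pv_equiv track=rewrite | github.com/edt-yxz-zzd/python3_src | nn_ns/algo/sep_str.py | border_width2int
-- ===== SOURCE A (Python) =====
-- def border_width2int(bw):
--     e = bw[0]
--     u = 0
--     for i in bw[1:]:
--         u += 1
--         u <<= e-i
--         e = i
--     u >>= 1
--     return u
-- ===== SOURCE B (Python) =====
-- def border_width2int(bw):
--     last = bw[-1]
--     return sum(1 << (x - last) for x in bw[:-1]) >> 1
-- ===== Notes on version B (the rewrite author's own statement) =====
-- stated objective: simpler
-- what changed: B replaces A's stateful loop (running exponent e and affine accumulator (u+1)<<diff) with a stateless closed form: the sum of 1<<(x - bw[-1]) over all but the last element, shifted right once.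
import Mathlib
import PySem

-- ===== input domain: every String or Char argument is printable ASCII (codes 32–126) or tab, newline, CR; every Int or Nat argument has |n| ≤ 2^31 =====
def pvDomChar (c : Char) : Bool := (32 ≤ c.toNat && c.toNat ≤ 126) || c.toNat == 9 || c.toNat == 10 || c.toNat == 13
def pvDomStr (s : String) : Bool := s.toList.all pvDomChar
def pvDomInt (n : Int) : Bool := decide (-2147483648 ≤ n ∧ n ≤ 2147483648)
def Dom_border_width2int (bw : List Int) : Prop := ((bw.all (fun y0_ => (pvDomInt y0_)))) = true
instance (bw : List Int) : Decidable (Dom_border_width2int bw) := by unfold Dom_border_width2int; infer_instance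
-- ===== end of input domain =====

-- B replaces A's stateful loop with a stateless closed form (sum of shifts relative to the
-- last element, halved); same result on Pre_, same O(n) cost (objective: simpler).

-- ===== PORT A =====
-- literal port of A: e = bw[0]; u = 0; for i in bw[1:]: u += 1; u <<= e-i; e = i; u >>= 1
-- the shift amount e-i is ≥ 0 under Pre_ (Python raises ValueError otherwise), so .toNat is exact there
def border_width2int (bw : List Int) : Int :=
  let e : Int := (PySem.List.pyGet? bw 0).getD 0
  let st := (PySem.List.slice bw (some 1) none).foldl
      (fun (st : Int × Int) (i : Int) =>
        let u := st.2 + 1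
        let u := u <<< (st.1 - i).toNat
        (i, u)) (e, 0)
  st.2 >>> 1

-- ===== PORT B =====
-- literal port of Source B: last = bw[-1]; return sum(1 << (x - last) for x in bw[:-1]) >> 1
-- the shift amount x-last is ≥ 0 under Pre_ (the list is non-increasing), so .toNat is exact there
def border_width2int_alt (bw : List Int) : Int :=
  let last : Int := (PySem.List.pyGet? bw (-1)).getD 0
  ((PySem.List.slice bw none (some (-1))).map
      (fun x => (1 : Int) <<< (x - last).toNat)).sum >>> 1

-- ===== PRECONDITION & SPEC =====
-- Pre_ excludes the empty list (A raises IndexError at bw[0]) and lists with an adjacent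
-- increasing pair (A's u <<= e-i raises ValueError: negative shift count).
def Pre_border_width2int (bw : List Int) : Prop :=
  bw ≠ [] ∧ List.IsChain (· ≥ ·) bw
instance (bw : List Int) : Decidable (Pre_border_width2int bw) := by
  unfold Pre_border_width2int; infer_instance
def pvWitness_border_width2int : List Int := [5, 3, 3, 0]

def Spec_border_width2int (bw : List Int) (out : Int) : Prop := out = border_width2int_alt bw
instance (bw : List Int) (out : Int) : Decidable (Spec_border_width2int bw out) := by unfold Spec_border_width2int; infer_instance

-- ===== CLAIM (what is proved, stated in full; the proofs are below) =====
def Claim_equal_border_width2int : Prop := ∀ (bw : List Int), Dom_border_width2int bw → Pre_border_width2int bw → Spec_border_width2int bw (border_width2int bw)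

-- ===== LEMMAS AND PROOFS =====

-- the common closed form: sum of 2^(x - base) over the elements of l
def bwSum (base : Int) (l : List Int) : Int :=
  (l.map (fun x => (2:Int) ^ (x - base).toNat)).sum

theorem bwSum_cons (base x : Int) (l : List Int) :
    bwSum base (x :: l) = (2:Int) ^ (x - base).toNat + bwSum base l := by
  simp [bwSum]

theorem bw_getLast?_cons (t : List Int) : ∀ a : Int, (a :: t).getLast? = some (t.getLastD a) := by
  induction t with
  | nil => intro a; rfl
  | cons b t ih => intro a; rw [List.getLast?_cons_cons, ih b, List.getLastD_cons]

theorem bw_ge_getLastD (i : Int) (l' : List Int) (h : List.IsChain (· ≥ ·) (i :: l')) :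
    i ≥ l'.getLastD i := by
  have hp := List.isChain_iff_pairwise.mp h
  rcases List.mem_cons.mp (List.getLastD_mem_cons (l := l') (a := i)) with he | hm
  · rw [he]
  · exact List.rel_of_pairwise_cons hp hm

-- A's loop, on a non-increasing chain from the running e, computes
-- u·2^(e-last) + Σ 2^(x-last) over the elements before the last
theorem bwA_fold (l : List Int) : ∀ (e u : Int), List.IsChain (· ≥ ·) (e :: l) →
    (l.foldl (fun (st : Int × Int) (i : Int) =>
        let u := st.2 + 1
        let u := u <<< (st.1 - i).toNat
        (i, u)) (e, u)).2
      = u * 2 ^ (e - l.getLastD e).toNat + bwSum (l.getLastD e) ((e :: l).dropLast) := by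
  induction l with
  | nil => intro e u _; simp [bwSum]
  | cons i l' ih =>
    intro e u hch
    rw [List.isChain_cons_cons] at hch
    obtain ⟨hei, hch'⟩ := hch
    have hil : i ≥ l'.getLastD i := bw_ge_getLastD i l' hch'
    have hrec := ih i ((u + 1) <<< (e - i).toNat) hch'
    simp only [List.foldl_cons]
    rw [hrec]
    have hL : (i :: l').getLastD e = l'.getLastD i := List.getLastD_cons ..
    have hdrop : (e :: i :: l').dropLast = e :: (i :: l').dropLast := by simp
    rw [hL, hdrop, bwSum_cons, Int.shiftLeft_eq]
    have hpow : (e - i).toNat + (i - l'.getLastD i).toNat = (e - l'.getLastD i).toNat := by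
      omega
    have hmul : (u + 1) * 2 ^ (e - i).toNat * 2 ^ (i - l'.getLastD i).toNat
        = (u + 1) * 2 ^ (e - l'.getLastD i).toNat := by
      rw [mul_assoc, ← pow_add, hpow]
    rw [hmul]
    ring

-- B's map-sum is literally bwSum
theorem bwB_sum (base : Int) (l : List Int) :
    (l.map (fun x => (1 : Int) <<< (x - base).toNat)).sum = bwSum base l := by
  unfold bwSum
  congr 1
  refine List.map_congr_left (fun x _ => ?_)
  rw [Int.shiftLeft_eq, one_mul]

-- ===== VERDICT (by name: the statement is the Claim_ definition above) =====
theorem border_width2int_spec : Claim_equal_border_width2int := by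
  intro bw _ hpre
  obtain ⟨hne, hch⟩ := hpre
  obtain ⟨a, t, rfl⟩ : ∃ a t, bw = a :: t := by
    cases bw with
    | nil => exact absurd rfl hne
    | cons a t => exact ⟨a, t, rfl⟩
  unfold Spec_border_width2int border_width2int border_width2int_alt
  simp only [PySem.List.slice_from_one, PySem.List.slice_to_neg_one,
    PySem.List.pyGet?_zero_cons, PySem.List.pyGet?_neg_one, List.tail_cons,
    bw_getLast?_cons, Option.getD_some]
  rw [bwA_fold t a 0 hch, bwB_sum]
  simp
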